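-- pv_equiv track=rewrite | github.com/NourAshoush/GlobeLogAssets | process_airports.py | filter_airports
-- ===== SOURCE A (Python) =====
-- from collections import Counter
-- from typing import Dict, Iterable, List, Tuple
--
-- ALLOWED_TYPES = {"medium_airport", "large_airport"}
--
-- def filter_airports(
--     rows: Iterable[Dict[str, str]],
--     timezones: Dict[str, str],
-- ) -> Tuple[List[Dict[str, str]], Counter, int, int, int]:
--     filtered: List[Dict[str, str]] = []
--     type_counts: Counter = Counter()
--     missing_iata = 0
--     missing_timezone = 0
--     missing_municipality = 0
--
--     for row in rows:
--         airport_type = row.get("type", "").strip()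
--         if airport_type not in ALLOWED_TYPES:
--             continue
--
--         iata_code = row.get("iata_code", "").strip()
--         if not iata_code:
--             missing_iata += 1
--             continue
--
--         municipality = (row.get("municipality") or "").strip()
--         if not municipality:
--             missing_municipality += 1
--
--         timezone = timezones.get(iata_code, "")
--         if not timezone:
--             missing_timezone += 1
--
--         type_counts[airport_type] += 1
--         filtered.append(
--             {
--                 "iata": iata_code,
--                 "name": row.get("name", "").strip(),
--                 "latitude_deg": row.get("latitude_deg", "").strip(),
--                 "longitude_deg": row.get("longitude_deg", "").strip(),
--                 "continent": row.get("continent", "").strip(),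
--                 "iso_country": row.get("iso_country", "").strip(),
--                 "municipality": municipality,
--                 "timezone": timezone,
--                 "icao_code": row.get("icao_code", "").strip(),
--                 "gps_code": row.get("gps_code", "").strip(),
--             }
--         )
--
--     filtered.sort(key=lambda airport: (airport["iata"], airport["name"]))
--     return filtered, type_counts, missing_iata, missing_timezone, missing_municipality
-- ===== SOURCE B (Python) =====
-- from collections import Counter
--
-- ALLOWED_TYPES = {"medium_airport", "large_airport"}
--
--
-- def _project(iata, row, timezones):
--     return {
--         "iata": iata,
--         "name": row.get("name", "").strip(),
--         "latitude_deg": row.get("latitude_deg", "").strip(),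
--         "longitude_deg": row.get("longitude_deg", "").strip(),
--         "continent": row.get("continent", "").strip(),
--         "iso_country": row.get("iso_country", "").strip(),
--         "municipality": (row.get("municipality") or "").strip(),
--         "timezone": timezones.get(iata, ""),
--         "icao_code": row.get("icao_code", "").strip(),
--         "gps_code": row.get("gps_code", "").strip(),
--     }
--
--
-- def filter_airports(rows, timezones):
--     allowed = [row for row in rows if row.get("type", "").strip() in ALLOWED_TYPES]
--     tagged = [(row.get("iata_code", "").strip(), row) for row in allowed]
--     missing_iata = sum(1 for iata, _ in tagged if not iata)
--     valid = [(iata, row) for iata, row in tagged if iata]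
--     type_counts = Counter(row.get("type", "").strip() for _, row in valid)
--     missing_municipality = sum(
--         1 for _, row in valid if not (row.get("municipality") or "").strip()
--     )
--     missing_timezone = sum(1 for iata, _ in valid if not timezones.get(iata, ""))
--     filtered = sorted(
--         (_project(iata, row, timezones) for iata, row in valid),
--         key=lambda airport: (airport["iata"], airport["name"]),
--     )
--     return filtered, type_counts, missing_iata, missing_timezone, missing_municipality
-- ===== Notes on version B (the rewrite author's own statement) =====
-- stated objective: alternative
-- what changed: Replaces A's single for-loop threading a 5-part accumulator (list, Counter, three counts) with a multi-pass pipeline: filter allowed rows, tag with stripped iata, count/drop missing iata, then compute the Counter, the two missing counts and the projected rows as separate comprehensions before sorting.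
import Mathlib
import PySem

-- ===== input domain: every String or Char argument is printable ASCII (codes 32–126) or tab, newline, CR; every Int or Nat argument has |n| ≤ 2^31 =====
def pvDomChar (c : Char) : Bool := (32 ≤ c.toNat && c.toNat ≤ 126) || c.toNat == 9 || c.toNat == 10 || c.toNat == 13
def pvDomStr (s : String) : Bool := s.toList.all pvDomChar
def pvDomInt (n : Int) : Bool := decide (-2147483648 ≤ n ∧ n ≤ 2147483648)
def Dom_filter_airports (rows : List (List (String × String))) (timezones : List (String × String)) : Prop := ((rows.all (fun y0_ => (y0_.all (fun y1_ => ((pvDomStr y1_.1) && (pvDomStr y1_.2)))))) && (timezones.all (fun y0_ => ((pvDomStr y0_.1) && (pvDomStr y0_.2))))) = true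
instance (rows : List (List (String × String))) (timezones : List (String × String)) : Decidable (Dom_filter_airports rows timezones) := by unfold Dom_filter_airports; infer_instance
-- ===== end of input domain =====

-- B re-implements the single accumulator-threaded loop as separate passes (filter, tag, counts, projection, sort); objective: alternative decomposition, same cost. Equivalence of RETURN values proved on all inputs.

-- ===== PORT A =====
-- A-side helper: row.get(k, "") on a dict row
def pvGetA (row : List (String × String)) (k : String) : String :=
  (PySem.Dict.mk row).getD k ""

-- A-side helper: the body of A's single for-loop, threading the 5-part accumulator
def pvStepA (timezones : List (String × String))
    (st : List (List (String × String)) × PySem.Dict String Int × Int × Int × Int)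
    (row : List (String × String)) :
    List (List (String × String)) × PySem.Dict String Int × Int × Int × Int :=
  let airport_type := PySem.Str.strip (pvGetA row "type")
  if !(airport_type == "medium_airport" || airport_type == "large_airport") then st
  else
    let iata_code := PySem.Str.strip (pvGetA row "iata_code")
    if iata_code == "" then (st.1, st.2.1, st.2.2.1 + 1, st.2.2.2.1, st.2.2.2.2)
    else
      let municipality := PySem.Str.strip (pvGetA row "municipality")
      let mm := if municipality == "" then st.2.2.2.2 + 1 else st.2.2.2.2
      let timezone := (PySem.Dict.mk timezones).getD iata_code ""
      let mt := if timezone == "" then st.2.2.2.1 + 1 else st.2.2.2.1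
      let tc := st.2.1.modify airport_type 0 (· + 1)
      let entry : List (String × String) :=
        [("iata", iata_code),
         ("name", PySem.Str.strip (pvGetA row "name")),
         ("latitude_deg", PySem.Str.strip (pvGetA row "latitude_deg")),
         ("longitude_deg", PySem.Str.strip (pvGetA row "longitude_deg")),
         ("continent", PySem.Str.strip (pvGetA row "continent")),
         ("iso_country", PySem.Str.strip (pvGetA row "iso_country")),
         ("municipality", municipality),
         ("timezone", timezone),
         ("icao_code", PySem.Str.strip (pvGetA row "icao_code")),
         ("gps_code", PySem.Str.strip (pvGetA row "gps_code"))]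
      (st.1 ++ [entry], tc, st.2.2.1, mt, mm)

def filter_airports (rows : List (List (String × String))) (timezones : List (String × String)) :
    (List (List (String × String))) × (List (String × Int)) × Int × Int × Int :=
  let r := rows.foldl (pvStepA timezones) ([], PySem.Dict.empty, 0, 0, 0)
  (PySem.List.sorted2 r.1
      (fun a => (PySem.Dict.mk a).getD "iata" "")
      (fun a => (PySem.Dict.mk a).getD "name" "") false,
   r.2.1.items, r.2.2.1, r.2.2.2.1, r.2.2.2.2)

-- ===== PORT B =====
-- B-side helper: row.get(k, "") on a dict row
def pvGetB (row : List (String × String)) (k : String) : String :=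
  (PySem.Dict.mk row).getD k ""

-- B-side helper: the _project dict builder
def pvProject (timezones : List (String × String)) (p : String × List (String × String)) :
    List (String × String) :=
  [("iata", p.1),
   ("name", PySem.Str.strip (pvGetB p.2 "name")),
   ("latitude_deg", PySem.Str.strip (pvGetB p.2 "latitude_deg")),
   ("longitude_deg", PySem.Str.strip (pvGetB p.2 "longitude_deg")),
   ("continent", PySem.Str.strip (pvGetB p.2 "continent")),
   ("iso_country", PySem.Str.strip (pvGetB p.2 "iso_country")),
   ("municipality", PySem.Str.strip (pvGetB p.2 "municipality")),
   ("timezone", (PySem.Dict.mk timezones).getD p.1 ""),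
   ("icao_code", PySem.Str.strip (pvGetB p.2 "icao_code")),
   ("gps_code", PySem.Str.strip (pvGetB p.2 "gps_code"))]

def filter_airports_alt (rows : List (List (String × String))) (timezones : List (String × String)) :
    (List (List (String × String))) × (List (String × Int)) × Int × Int × Int :=
  let allowed := rows.filter (fun row =>
    let t := PySem.Str.strip (pvGetB row "type")
    t == "medium_airport" || t == "large_airport")
  let tagged := allowed.map (fun row => (PySem.Str.strip (pvGetB row "iata_code"), row))
  let missing_iata : Int := (tagged.countP (fun p => p.1 == "") : Int)
  let valid := tagged.filter (fun p => !(p.1 == ""))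
  let type_counts := PySem.Dict.counter (valid.map (fun p => PySem.Str.strip (pvGetB p.2 "type")))
  let missing_municipality : Int :=
    (valid.countP (fun p => PySem.Str.strip (pvGetB p.2 "municipality") == "") : Int)
  let missing_timezone : Int :=
    (valid.countP (fun p => (PySem.Dict.mk timezones).getD p.1 "" == "") : Int)
  let filtered := PySem.List.sorted2 (valid.map (pvProject timezones))
      (fun a => (PySem.Dict.mk a).getD "iata" "")
      (fun a => (PySem.Dict.mk a).getD "name" "") false
  (filtered, type_counts.items, missing_iata, missing_timezone, missing_municipality)

-- ===== PRECONDITION & SPEC =====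
def Spec_filter_airports (rows : List (List (String × String))) (timezones : List (String × String)) (out : (List (List (String × String))) × (List (String × Int)) × Int × Int × Int) : Prop := out = filter_airports_alt rows timezones
instance (rows : List (List (String × String))) (timezones : List (String × String)) (out : (List (List (String × String))) × (List (String × Int)) × Int × Int × Int) : Decidable (Spec_filter_airports rows timezones out) := by unfold Spec_filter_airports; infer_instance

-- ===== CLAIM (what is proved, stated in full; the proofs are below) =====
def Claim_equal_filter_airports : Prop := ∀ (rows : List (List (String × String))) (timezones : List (String × String)), Dom_filter_airports rows timezones → Spec_filter_airports rows timezones (filter_airports rows timezones)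

-- ===== LEMMAS AND PROOFS =====

-- the `valid` list of B (iata-tagged allowed rows with non-empty iata)
def pvValid (rows : List (List (String × String))) : List (String × List (String × String)) :=
  ((rows.filter (fun row =>
      let t := PySem.Str.strip (pvGetB row "type")
      t == "medium_airport" || t == "large_airport")).map
    (fun row => (PySem.Str.strip (pvGetB row "iata_code"), row))).filter
    (fun p => !(p.1 == ""))

-- the `tagged` list of B
def pvTagged (rows : List (List (String × String))) : List (String × List (String × String)) :=
  (rows.filter (fun row =>
      let t := PySem.Str.strip (pvGetB row "type")
      t == "medium_airport" || t == "large_airport")).map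
    (fun row => (PySem.Str.strip (pvGetB row "iata_code"), row))

theorem pvStepA_skip (timezones : List (String × String))
    (st : List (List (String × String)) × PySem.Dict String Int × Int × Int × Int)
    (row : List (String × String))
    (hA : (PySem.Str.strip ((PySem.Dict.mk row).getD "type" "") == "medium_airport"
        || PySem.Str.strip ((PySem.Dict.mk row).getD "type" "") == "large_airport") = false) :
    pvStepA timezones st row = st := by
  simp only [pvStepA, pvGetA]
  rw [hA]
  simp

theorem pvStepA_noiata (timezones : List (String × String))
    (st : List (List (String × String)) × PySem.Dict String Int × Int × Int × Int)
    (row : List (String × String))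
    (hA : (PySem.Str.strip ((PySem.Dict.mk row).getD "type" "") == "medium_airport"
        || PySem.Str.strip ((PySem.Dict.mk row).getD "type" "") == "large_airport") = true)
    (hI : (PySem.Str.strip ((PySem.Dict.mk row).getD "iata_code" "") == "") = true) :
    pvStepA timezones st row = (st.1, st.2.1, st.2.2.1 + 1, st.2.2.2.1, st.2.2.2.2) := by
  simp only [pvStepA, pvGetA]
  rw [hA, hI]
  simp

theorem pvStepA_keep (timezones : List (String × String))
    (st : List (List (String × String)) × PySem.Dict String Int × Int × Int × Int)
    (row : List (String × String))
    (hA : (PySem.Str.strip ((PySem.Dict.mk row).getD "type" "") == "medium_airport"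
        || PySem.Str.strip ((PySem.Dict.mk row).getD "type" "") == "large_airport") = true)
    (hI : (PySem.Str.strip ((PySem.Dict.mk row).getD "iata_code" "") == "") = false) :
    pvStepA timezones st row =
      (st.1 ++ [pvProject timezones (PySem.Str.strip ((PySem.Dict.mk row).getD "iata_code" ""), row)],
       st.2.1.modify (PySem.Str.strip ((PySem.Dict.mk row).getD "type" "")) 0 (· + 1),
       st.2.2.1,
       (if ((PySem.Dict.mk timezones).getD (PySem.Str.strip ((PySem.Dict.mk row).getD "iata_code" "")) "" == "") = true
          then st.2.2.2.1 + 1 else st.2.2.2.1),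
       (if (PySem.Str.strip ((PySem.Dict.mk row).getD "municipality" "") == "") = true
          then st.2.2.2.2 + 1 else st.2.2.2.2)) := by
  simp only [pvStepA, pvGetA, pvProject, pvGetB]
  rw [hA, hI]
  simp

theorem pvFoldA (timezones : List (String × String)) (rows : List (List (String × String)))
    (f : List (List (String × String))) (tc : PySem.Dict String Int) (mi mt mm : Int) :
    rows.foldl (pvStepA timezones) (f, tc, mi, mt, mm) =
      (f ++ (pvValid rows).map (pvProject timezones),
       ((pvValid rows).map (fun p => PySem.Str.strip (pvGetB p.2 "type"))).foldl
          (fun d x => d.modify x 0 (· + 1)) tc,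
       mi + ((pvTagged rows).countP (fun p => p.1 == "") : Int),
       mt + ((pvValid rows).countP (fun p => (PySem.Dict.mk timezones).getD p.1 "" == "") : Int),
       mm + ((pvValid rows).countP (fun p => PySem.Str.strip (pvGetB p.2 "municipality") == "") : Int)) := by
  induction rows generalizing f tc mi mt mm with
  | nil => simp [pvValid, pvTagged]
  | cons row rs ih =>
    cases hA : (PySem.Str.strip ((PySem.Dict.mk row).getD "type" "") == "medium_airport"
        || PySem.Str.strip ((PySem.Dict.mk row).getD "type" "") == "large_airport") with
    | false =>
      rw [List.foldl_cons, pvStepA_skip timezones _ row hA, ih]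
      simp [pvValid, pvTagged, pvGetB, hA]
    | true =>
      cases hI : (PySem.Str.strip ((PySem.Dict.mk row).getD "iata_code" "") == "") with
      | true =>
        rw [List.foldl_cons, pvStepA_noiata timezones _ row hA hI, ih]
        simp only [pvValid, pvTagged, pvGetB, List.filter_cons, List.map_cons,
          List.countP_cons, hA, hI, if_true, Bool.not_true, Bool.false_eq_true, if_false,
          Prod.mk.injEq]
        and_intros <;> first | rfl | exact trivial | (push_cast; ring)
      | false =>
        rw [List.foldl_cons, pvStepA_keep timezones _ row hA hI, ih]
        simp only [pvValid, pvTagged, pvGetB, List.filter_cons, List.map_cons,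
          List.countP_cons, List.foldl_cons, hA, hI, if_true, Bool.not_false,
          Bool.false_eq_true, if_false, Prod.mk.injEq, List.append_assoc,
          List.singleton_append]
        and_intros
        all_goals first | rfl | exact trivial | (split_ifs <;> push_cast <;> ring)

-- ===== VERDICT (by name: the statement is the Claim_ definition above) =====
theorem filter_airports_spec : Claim_equal_filter_airports := by
  intro rows timezones _
  unfold Spec_filter_airports filter_airports filter_airports_alt
  rw [pvFoldA]
  simp [pvValid, pvTagged, PySem.Dict.counter_eq_foldl]
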